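-- pv_equiv track=rewrite | github.com/jquiaot/glowing-winner-leetcode | leetcode/2381__shifting_letters_2.py | shiftingLetters2
-- ===== SOURCE A (Python) =====
-- from typing import List
--
-- def shiftingLetters2(s: str, shifts: List[List[int]]) -> str:
--     """
--     Using hints: similar to above, but somehow setup prefix sum to
--     manage the offsets
--     """
--     charShifts = [0 for c in s]
--     maxIdx = len(s) - 1
--     for shift in shifts:
--         shiftDir = 1 if shift[2] == 1 else -1
--         charShifts[shift[0]] += shiftDir
--         if shift[1] < maxIdx:
--             charShifts[shift[1] + 1] -= shiftDir
--
--     chars = [c for c in 'abcdefghijklmnopqrstuvwxyz']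
--     ordA = ord('a')
--     newS = []
--     curOffset = 0
--     for i in range(len(s)):
--         c = s[i]
--         curOffset += charShifts[i]
--         newC = chars[(ord(c) - ordA + curOffset) % 26]
--         newS.append(newC)
--     return ''.join(newS)
-- ===== SOURCE B (Python) =====
-- def shiftingLetters2(s, shifts):
--     n = len(s)
--     offset = [0] * n
--     for shift in shifts:
--         l, r, d = shift[0], shift[1], shift[2]
--         step = 1 if d == 1 else -1
--         for i in range(l, r + 1):
--             offset[i] += step
--     return ''.join(chr((ord(c) - 97 + off) % 26 + 97) for c, off in zip(s, offset))
-- ===== Notes on version B (the rewrite author's own statement) =====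
-- stated objective: alternative
-- what changed: B replaces A's difference-array-with-prefix-sum-carry by a naive direct update: each shift [l,r,d] adds its step to every offset[i] for i in l..r, and a final zip pass maps each character with its own offset; no endpoint trick and no running carry.
-- outside the precondition, e.g. on shiftingLetters2('ab', [[-1, 5, 1]]): A returns 'ac', B raises IndexError; on shiftingLetters2('ab', [[0, 5, 1]]): A returns 'bc', B raises IndexError; on shiftingLetters2('abc', [[2, 0, 1]]): A returns 'aac', B returns 'abc'
import Mathlib
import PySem

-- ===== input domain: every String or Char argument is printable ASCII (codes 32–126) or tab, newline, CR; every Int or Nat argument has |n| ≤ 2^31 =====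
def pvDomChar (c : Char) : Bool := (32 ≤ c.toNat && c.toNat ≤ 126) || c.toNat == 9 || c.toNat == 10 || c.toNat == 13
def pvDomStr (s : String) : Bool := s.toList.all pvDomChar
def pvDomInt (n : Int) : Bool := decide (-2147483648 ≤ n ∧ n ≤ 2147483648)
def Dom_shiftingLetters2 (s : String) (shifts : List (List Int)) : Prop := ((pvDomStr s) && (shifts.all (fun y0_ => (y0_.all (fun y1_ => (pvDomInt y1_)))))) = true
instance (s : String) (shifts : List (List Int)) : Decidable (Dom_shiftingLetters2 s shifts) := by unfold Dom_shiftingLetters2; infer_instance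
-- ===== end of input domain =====

-- B applies each shift naively to every index of its range and maps characters with chr/%26,
-- instead of A's difference array with a prefix-sum carry; objective: alternative (same result, different algorithm).

-- ===== PORT A =====
-- body of A's 'for shift in shifts' loop (difference-array writes)
def pvStepA (maxIdx : Int) (cs : List Int) (shift : List Int) : List Int :=
  let shiftDir : Int := if PySem.List.pyGetD shift 2 0 = 1 then 1 else -1
  let cs1 := PySem.List.pySetD cs (PySem.List.pyGetD shift 0 0)
      (PySem.List.pyGetD cs (PySem.List.pyGetD shift 0 0) 0 + shiftDir)
  if PySem.List.pyGetD shift 1 0 < maxIdx then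
    PySem.List.pySetD cs1 (PySem.List.pyGetD shift 1 0 + 1)
      (PySem.List.pyGetD cs1 (PySem.List.pyGetD shift 1 0 + 1) 0 - shiftDir)
  else cs1

def shiftingLetters2 (s : String) (shifts : List (List Int)) : String :=
  let cs := s.toList
  let charShifts := shifts.foldl (pvStepA ((cs.length : Int) - 1)) (List.replicate cs.length (0 : Int))
  let chars := "abcdefghijklmnopqrstuvwxyz".toList
  let res := (List.range cs.length).foldl (fun (acc : List Char × Int) (i : Nat) =>
      let c := PySem.List.pyGetD cs (i : Int) 'a'
      let cur := acc.2 + PySem.List.pyGetD charShifts (i : Int) 0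
      (acc.1 ++ [PySem.List.pyGetD chars (PySem.Int.mod ((c.toNat : Int) - 97 + cur) 26) 'a'], cur))
    ([], 0)
  String.mk res.1

-- ===== PORT B =====
-- body of B's 'for shift in shifts' loop (direct per-index update over range(l, r+1))
def pvStepB (off : List Int) (shift : List Int) : List Int :=
  let l := PySem.List.pyGetD shift 0 0
  let r := PySem.List.pyGetD shift 1 0
  let step : Int := if PySem.List.pyGetD shift 2 0 = 1 then 1 else -1
  (PySem.List.pyRange l (r + 1) 1).foldl
    (fun o i => PySem.List.pySetD o i (PySem.List.pyGetD o i 0 + step)) off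

def shiftingLetters2_alt (s : String) (shifts : List (List Int)) : String :=
  let cs := s.toList
  let offset := shifts.foldl pvStepB (List.replicate cs.length (0 : Int))
  String.mk ((cs.zip offset).map (fun p =>
    Char.ofNat ((PySem.Int.mod ((p.1.toNat : Int) - 97 + p.2) 26 + 97).toNat)))

-- ===== PRECONDITION & SPEC =====
-- a shift is well-formed for a string of length n: at least 3 entries with 0 ≤ l ≤ r < n
def pvShiftOK (n : Nat) (sh : List Int) : Bool :=
  match sh with
  | l :: r :: _ :: _ => decide (0 ≤ l ∧ l ≤ r ∧ r < (n : Int))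
  | _ => false

-- Pre_ excludes malformed shift triples (fewer than 3 entries, or negative / reversed / out-of-range
-- endpoints): there A raises or its difference-array writes (negative-index wraparound, skipped
-- endpoint write) give accidental values, while B's plain range loop raises or does nothing.
def Pre_shiftingLetters2 (s : String) (shifts : List (List Int)) : Prop :=
  (shifts.all (pvShiftOK s.toList.length)) = true
instance (s : String) (shifts : List (List Int)) : Decidable (Pre_shiftingLetters2 s shifts) := by
  unfold Pre_shiftingLetters2; infer_instance

def pvWitness_shiftingLetters2 : String × List (List Int) := ("abc", [[0, 1, 1], [1, 2, 0]])

def Spec_shiftingLetters2 (s : String) (shifts : List (List Int)) (out : String) : Prop := out = shiftingLetters2_alt s shifts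
instance (s : String) (shifts : List (List Int)) (out : String) : Decidable (Spec_shiftingLetters2 s shifts out) := by unfold Spec_shiftingLetters2; infer_instance

-- ===== CLAIM (what is proved, stated in full; the proofs are below) =====
def Claim_equal_shiftingLetters2 : Prop := ∀ (s : String) (shifts : List (List Int)), Dom_shiftingLetters2 s shifts → Pre_shiftingLetters2 s shifts → Spec_shiftingLetters2 s shifts (shiftingLetters2 s shifts)

-- ===== LEMMAS AND PROOFS =====

-- the total shift a single well-formed shift contributes to index i
def pvContrib (i : Int) (sh : List Int) : Int :=
  if PySem.List.pyGetD sh 0 0 ≤ i ∧ i ≤ PySem.List.pyGetD sh 1 0 then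
    (if PySem.List.pyGetD sh 2 0 = 1 then 1 else -1)
  else 0

-- the total shift all shifts contribute to index i
def pvTot (shifts : List (List Int)) (i : Int) : Int := (shifts.map (pvContrib i)).sum

-- length preservation
theorem pvStepA_length (maxIdx : Int) (cs sh : List Int) :
    (pvStepA maxIdx cs sh).length = cs.length := by
  unfold pvStepA
  split_ifs <;> simp [PySem.List.length_pySetD]

theorem pvFoldA_length (shifts : List (List Int)) (maxIdx : Int) (cs : List Int) :
    (shifts.foldl (pvStepA maxIdx) cs).length = cs.length := by
  induction shifts generalizing cs with
  | nil => rfl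
  | cons sh t ih => simp [List.foldl_cons, ih, pvStepA_length]

-- prefix sums of a single set-add
theorem pvSum_take_set (cs : List Int) (k : Nat) (v : Int) (i : Nat) (hk : k < cs.length) :
    ((cs.set k (cs.getD k 0 + v)).take (i + 1)).sum
      = (cs.take (i + 1)).sum + (if k ≤ i then v else 0) := by
  induction cs generalizing k i with
  | nil => simp at hk
  | cons c t ih =>
    cases k with
    | zero => simp [List.take_succ_cons]; ring
    | succ k' =>
      cases i with
      | zero => simp [List.take_succ_cons]
      | succ i' =>
        simp only [List.getD_cons_succ, List.set_cons_succ, List.take_succ_cons, List.sum_cons]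
        rw [ih k' i' (by simpa using hk)]
        by_cases h : k' ≤ i' <;> simp [h] <;> ring

theorem pvStepA_sum (n : Nat) (cs sh : List Int) (hlen : cs.length = n)
    (hok : pvShiftOK n sh = true) (i : Nat) (hi : i < n) :
    ((pvStepA ((n : Int) - 1) cs sh).take (i + 1)).sum
      = (cs.take (i + 1)).sum + pvContrib (i : Int) sh := by
  match sh, hok with
  | l :: r :: d :: rest, hok =>
    simp only [pvShiftOK, decide_eq_true_eq] at hok
    obtain ⟨hl, hlr, hr⟩ := hok
    have h0 : PySem.List.pyGetD (l :: r :: d :: rest) 0 0 = l := by simp [pysem]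
    have h1 : PySem.List.pyGetD (l :: r :: d :: rest) 1 0 = r := by simp [pysem]
    simp only [pvStepA, pvContrib, h0, h1]
    rw [PySem.List.pySetD_of_nonneg _ _ hl, PySem.List.pyGetD_of_nonneg _ _ hl]
    have hk1 : l.toNat < cs.length := by omega
    by_cases hc : r < (n : Int) - 1
    · rw [if_pos hc]
      have h2 : (0 : Int) ≤ r + 1 := by omega
      rw [PySem.List.pySetD_of_nonneg _ _ h2, PySem.List.pyGetD_of_nonneg _ _ h2,
          sub_eq_add_neg]
      rw [pvSum_take_set _ _ _ _ (by simp only [List.length_set]; omega),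
          pvSum_take_set _ _ _ _ hk1]
      split_ifs <;> omega
    · rw [if_neg hc]
      rw [pvSum_take_set _ _ _ _ hk1]
      split_ifs <;> omega

theorem pvFoldA_sum (shifts : List (List Int)) (n : Nat) (cs : List Int) (hlen : cs.length = n)
    (h : ∀ sh ∈ shifts, pvShiftOK n sh = true) (i : Nat) (hi : i < n) :
    ((shifts.foldl (pvStepA ((n : Int) - 1)) cs).take (i + 1)).sum
      = (cs.take (i + 1)).sum + pvTot shifts (i : Int) := by
  induction shifts generalizing cs with
  | nil => simp [pvTot]
  | cons sh t ih =>
    simp only [List.foldl_cons]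
    rw [ih (pvStepA ((n : Int) - 1) cs sh) (by rw [pvStepA_length, hlen])
        (fun x hx => h x (List.mem_cons_of_mem _ hx))]
    rw [pvStepA_sum n cs sh hlen (h sh List.mem_cons_self) i hi]
    simp [pvTot]
    ring

theorem pvGetD_set (xs : List Int) (k i : Nat) (v : Int) (hk : k < xs.length) :
    (xs.set k v).getD i 0 = if i = k then v else xs.getD i 0 := by
  simp only [List.getD_eq_getElem?_getD, List.getElem?_set]
  by_cases h : k = i
  · subst h; simp [hk]
  · rw [if_neg h, if_neg (by omega)]

-- B's inner range loop, pointwise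
theorem pvInner_getD (off : List Int) (a b : Int) (step : Int) (ha : 0 ≤ a)
    (hb : b ≤ (off.length : Int)) (i : Nat) :
    ((PySem.List.pyRange a b 1).foldl
        (fun o j => PySem.List.pySetD o j (PySem.List.pyGetD o j 0 + step)) off).getD i 0
      = off.getD i 0 + (if a ≤ (i : Int) ∧ (i : Int) < b then step else 0) := by
  obtain ⟨m, hm⟩ : ∃ m, (b - a).toNat = m := ⟨_, rfl⟩
  induction m generalizing off a with
  | zero =>
    rw [PySem.List.pyRange_one_eq_nil (by omega)]
    simp only [List.foldl_nil]
    rw [if_neg (by omega)]; ring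
  | succ m ih =>
    have hab : a < b := by omega
    rw [PySem.List.pyRange_one_cons hab, List.foldl_cons]
    have hlen' : (PySem.List.pySetD off a (PySem.List.pyGetD off a 0 + step)).length
        = off.length := PySem.List.length_pySetD _ _ _
    rw [ih _ (a + 1) (by omega) (by rw [hlen']; exact hb) (by omega)]
    rw [PySem.List.pySetD_of_nonneg _ _ ha, PySem.List.pyGetD_of_nonneg _ _ ha]
    rw [pvGetD_set off a.toNat i _ (by omega)]
    have hcast : ((a.toNat : Int)) = a := by omega
    by_cases hia : i = a.toNat
    · subst hia
      rw [if_pos rfl, List.getD_eq_getElem?_getD, List.getElem?_eq_getElem (by omega),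
          Option.getD_some, if_neg (by omega), if_pos (by constructor <;> omega)]
      ring
    · rw [if_neg hia]
      by_cases h1 : a + 1 ≤ (i : Int) ∧ (i : Int) < b
      · rw [if_pos h1, if_pos (by omega)]
      · rw [if_neg h1, if_neg (by omega)]

theorem pvInner_length (off : List Int) (a b step : Int) (ha : 0 ≤ a) (hb : b ≤ (off.length : Int)) :
    ((PySem.List.pyRange a b 1).foldl
        (fun o j => PySem.List.pySetD o j (PySem.List.pyGetD o j 0 + step)) off).length
      = off.length := by
  obtain ⟨m, hm⟩ : ∃ m, (b - a).toNat = m := ⟨_, rfl⟩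
  induction m generalizing off a with
  | zero => rw [PySem.List.pyRange_one_eq_nil (by omega)]; rfl
  | succ m ih =>
    rw [PySem.List.pyRange_one_cons (by omega), List.foldl_cons]
    rw [ih _ (a + 1) (by omega) (by rw [PySem.List.length_pySetD]; exact hb) (by omega)]
    exact PySem.List.length_pySetD _ _ _

theorem pvStepB_length (n : Nat) (off sh : List Int) (hlen : off.length = n)
    (hok : pvShiftOK n sh = true) : (pvStepB off sh).length = n := by
  match sh, hok with
  | l :: r :: d :: rest, hok =>
    simp only [pvShiftOK, decide_eq_true_eq] at hok
    simp only [pvStepB, show PySem.List.pyGetD (l :: r :: d :: rest) 0 0 = l by simp [pysem],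
      show PySem.List.pyGetD (l :: r :: d :: rest) 1 0 = r by simp [pysem]]
    rw [pvInner_length off l (r + 1) _ (by omega) (by omega)]
    exact hlen

theorem pvStepB_getD (n : Nat) (off sh : List Int) (hlen : off.length = n)
    (hok : pvShiftOK n sh = true) (i : Nat) :
    (pvStepB off sh).getD i 0 = off.getD i 0 + pvContrib (i : Int) sh := by
  match sh, hok with
  | l :: r :: d :: rest, hok =>
    simp only [pvShiftOK, decide_eq_true_eq] at hok
    simp only [pvStepB, pvContrib,
      show PySem.List.pyGetD (l :: r :: d :: rest) 0 0 = l by simp [pysem],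
      show PySem.List.pyGetD (l :: r :: d :: rest) 1 0 = r by simp [pysem]]
    rw [pvInner_getD off l (r + 1) _ (by omega) (by omega)]
    congr 1
    by_cases h : l ≤ (i : Int) ∧ (i : Int) ≤ r
    · rw [if_pos (by omega), if_pos h]
    · rw [if_neg (by omega), if_neg h]

theorem pvFoldB_getD (shifts : List (List Int)) (n : Nat) (off : List Int) (hlen : off.length = n)
    (h : ∀ sh ∈ shifts, pvShiftOK n sh = true) (i : Nat) :
    (shifts.foldl pvStepB off).getD i 0 = off.getD i 0 + pvTot shifts (i : Int) := by
  induction shifts generalizing off with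
  | nil => simp [pvTot]
  | cons sh t ih =>
    simp only [List.foldl_cons]
    rw [ih (pvStepB off sh) (pvStepB_length n off sh hlen (h sh List.mem_cons_self))
        (fun x hx => h x (List.mem_cons_of_mem _ hx))]
    rw [pvStepB_getD n off sh hlen (h sh List.mem_cons_self) i]
    simp [pvTot]; ring

theorem pvFoldB_length (shifts : List (List Int)) (n : Nat) (off : List Int) (hlen : off.length = n)
    (h : ∀ sh ∈ shifts, pvShiftOK n sh = true) : (shifts.foldl pvStepB off).length = n := by
  induction shifts generalizing off with
  | nil => exact hlen
  | cons sh t ih =>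
    simp only [List.foldl_cons]
    exact ih (pvStepB off sh) (pvStepB_length n off sh hlen (h sh List.mem_cons_self))
      (fun x hx => h x (List.mem_cons_of_mem _ hx))

-- A's output-building loop as a map over range
theorem pvLoopA (cs : List Char) (ds : List Int) (n : Nat) (hn : n ≤ ds.length) :
    (List.range n).foldl (fun (acc : List Char × Int) (i : Nat) =>
        let c := PySem.List.pyGetD cs (i : Int) 'a'
        let cur := acc.2 + PySem.List.pyGetD ds (i : Int) 0
        (acc.1 ++ [PySem.List.pyGetD ("abcdefghijklmnopqrstuvwxyz".toList)
            (PySem.Int.mod ((c.toNat : Int) - 97 + cur) 26) 'a'], cur)) ([], 0)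
      = ((List.range n).map (fun (i : Nat) =>
          PySem.List.pyGetD ("abcdefghijklmnopqrstuvwxyz".toList)
            (PySem.Int.mod (((PySem.List.pyGetD cs (i : Int) 'a').toNat : Int) - 97
              + (ds.take (i + 1)).sum) 26) 'a'),
         (ds.take n).sum) := by
  induction n with
  | zero => simp
  | succ n ih =>
    have hn' : n ≤ ds.length := by omega
    have hsum : (ds.take (n + 1)).sum = (ds.take n).sum + PySem.List.pyGetD ds (n : Int) 0 := by
      rw [PySem.List.pyGetD_natCast, List.take_add_one, List.sum_append,
          List.getD_eq_getElem?_getD, List.getElem?_eq_getElem (by omega)]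
      simp
    rw [List.range_succ, List.foldl_append, ih hn', List.foldl_cons, List.foldl_nil,
        List.map_append, List.map_singleton, hsum]

-- alphabet lookup equals chr(k + 97)
theorem pvAlphaChar (t : Int) (ht0 : 0 ≤ t) (ht : t < 26) :
    PySem.List.pyGetD ("abcdefghijklmnopqrstuvwxyz".toList) t 'a'
      = Char.ofNat ((t + 97).toNat) := by
  obtain ⟨k, rfl⟩ : ∃ k : Nat, (k : Int) = t := ⟨t.toNat, by omega⟩
  rw [PySem.List.pyGetD_natCast, show ((k : Int) + 97).toNat = k + 97 by omega]
  exact (by decide : ∀ k : Nat, k < 26 →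
    ("abcdefghijklmnopqrstuvwxyz".toList.getD k 'a' = Char.ofNat (k + 97))) k (by omega)

-- ===== VERDICT (by name: the statement is the Claim_ definition above) =====
theorem shiftingLetters2_spec : Claim_equal_shiftingLetters2 := by
  intro s shifts _ hpre
  simp only [Spec_shiftingLetters2, shiftingLetters2, shiftingLetters2_alt]
  have hok : ∀ sh ∈ shifts, pvShiftOK s.toList.length sh = true := by
    simpa [Pre_shiftingLetters2, List.all_eq_true] using hpre
  set cs := s.toList with hcs
  set n := cs.length with hn
  set CS := shifts.foldl (pvStepA ((n : Int) - 1)) (List.replicate n (0 : Int)) with hCS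
  set OFF := shifts.foldl pvStepB (List.replicate n (0 : Int)) with hOFF
  have hCSlen : CS.length = n := by
    rw [hCS, pvFoldA_length]; simp
  have hOFFlen : OFF.length = n := by
    rw [hOFF]; exact pvFoldB_length shifts n _ (by simp) hok
  rw [pvLoopA cs CS n (by omega)]
  congr 1
  apply List.ext_getElem
  · simp [hOFFlen, hn]
  intro j hj1 hj2
  have hjn : j < n := by simpa using hj1
  have hrep : ((List.replicate n (0 : Int)).take (j + 1)).sum = 0 := by
    simp [List.take_replicate]
  have hrepg : (List.replicate n (0 : Int)).getD j 0 = 0 := by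
    simp [List.getD_eq_getElem?_getD, hjn]
  have hA : (CS.take (j + 1)).sum = pvTot shifts (j : Int) := by
    rw [hCS, pvFoldA_sum shifts n _ (by simp) hok j hjn, hrep, zero_add]
  have hB : OFF.getD j 0 = pvTot shifts (j : Int) := by
    rw [hOFF, pvFoldB_getD shifts n _ (by simp) hok j, hrepg, zero_add]
  have hcj : PySem.List.pyGetD cs (j : Int) 'a' = cs[j]'(by omega) := by
    rw [PySem.List.pyGetD_natCast, List.getD_eq_getElem?_getD,
        List.getElem?_eq_getElem (by omega), Option.getD_some]
  simp only [List.getElem_map, List.getElem_zip, List.getElem_range]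
  rw [hcj, hA]
  have hz : OFF[j]'(by omega) = pvTot shifts (j : Int) := by
    rw [← hB, List.getD_eq_getElem?_getD, List.getElem?_eq_getElem (by omega), Option.getD_some]
  rw [hz]
  exact pvAlphaChar _ (PySem.Int.mod_nonneg _ (by omega)) (PySem.Int.mod_lt _ (by omega))
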